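-- pv_equiv track=rewrite | github.com/qianji/LED | Parser.py | closeParentesis
-- ===== SOURCE A (Python) =====
-- def closeParentesis(L,S):
--     R = '}'
--     if L=='{':
--         R = '}'
--     if L=='[':
--         R = ']'
--     if L =='(':
--         R = ')'
--     if L =='/':
--         R == '/'
--     S = list(S)
--     #create an empty stack S
--     index = 0
--     stack = []
--     while(len(S)>0):
--         # read a character ch
--         ch = S[0]
--         #If ch is an opening paren (of any kind), push it onto stack
--         if ch ==L:
--             stack.append(ch)
--         else:
--             # If  ch  is a closing paren }, look at the top of stack.
--             if ch==R:
--                 #If stack is empty at this point, retrun index.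
--                 if len(stack)==0:
--                     return index
--                 top = stack[-1]
--                 # If the top of stack is the opening paren that corresponds to {,
--                 # then pop stack and continue, this paren matches OK.
--                 if top==L:
--                     stack=stack[:-1]
--                     S=S[1:]
--                     index+=1
--                     continue
--                 else:
--                     return index
--         S=S[1:]
--         index+=1
--     return None
-- ===== SOURCE B (Python) =====
-- def closeParentesis(L, S):
--     # Two staged passes: build the running paren-balance sequence, then the
--     # answer is the first index where the balance hits -1 (list.index), if any.
--     R = {'[': ']', '(': ')'}.get(L, '}')
--     balances = []
--     bal = 0
--     for c in S:
--         bal += (c == L) - (c == R)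
--         balances.append(bal)
--     try:
--         return balances.index(-1)
--     except ValueError:
--         return None
-- ===== Notes on version B (the rewrite author's own statement) =====
-- stated objective: faster
-- what changed: B drops A's stack-and-reslicing scan entirely: it maps characters to +1/-1 deltas, builds the full running-balance list in one pass, and returns balances.index(-1) (first index where the balance goes negative), catching ValueError as None.
import Mathlib
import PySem

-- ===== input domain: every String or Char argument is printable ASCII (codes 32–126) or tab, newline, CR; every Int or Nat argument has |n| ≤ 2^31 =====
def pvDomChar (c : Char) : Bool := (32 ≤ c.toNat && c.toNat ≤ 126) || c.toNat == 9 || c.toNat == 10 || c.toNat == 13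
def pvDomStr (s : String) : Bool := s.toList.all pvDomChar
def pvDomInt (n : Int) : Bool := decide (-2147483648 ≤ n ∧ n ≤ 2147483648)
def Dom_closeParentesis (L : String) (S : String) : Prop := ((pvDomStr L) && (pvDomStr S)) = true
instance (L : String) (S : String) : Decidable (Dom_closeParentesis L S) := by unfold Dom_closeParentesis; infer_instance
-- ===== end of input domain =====

-- B: staged passes — build the running paren-balance list, then take the first index whose balance is -1 (faster).


-- ===== PORT A =====
-- R = '}' ; overwritten for '[' and '(' ; the '/' branch is `R == '/'`, a no-op comparison, so R stays '}'
def closeParentesisR (L : String) : String :=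
  if L = "{" then "}" else if L = "[" then "]" else if L = "(" then ")" else "}"

-- the while loop of A: state is the remaining characters S, index, and the stack list
def closeParentesisLoop (L R : String) (S : List Char) (index : Int) (stack : List Char) : Option Int :=
  match S with
  | [] => none
  | ch :: rest =>
    if String.mk [ch] = L then
      closeParentesisLoop L R rest (index + 1) (stack ++ [ch])
    else if String.mk [ch] = R then
      if stack = [] then some index
      else
        let top := stack.getLastD ' '
        if String.mk [top] = L then
          closeParentesisLoop L R rest (index + 1) stack.dropLast
        else some index
    else
      closeParentesisLoop L R rest (index + 1) stack

def closeParentesis (L : String) (S : String) : Option Int :=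
  closeParentesisLoop L (closeParentesisR L) S.toList 0 []

-- ===== PORT B =====
-- the for loop of B: build the running-balance list (bal += (c==L) - (c==R); balances.append(bal))
def closeParentesisBal (L R : String) (S : List Char) (bal : Int) : List Int :=
  match S with
  | [] => []
  | c :: rest =>
    let b := bal + ((if String.mk [c] = L then 1 else 0) - (if String.mk [c] = R then 1 else 0))
    b :: closeParentesisBal L R rest b

-- balances.index(-1), with ValueError caught as None
def closeParentesis_alt (L : String) (S : String) : Option Int :=
  let R := if L = "[" then "]" else if L = "(" then ")" else "}"
  match PySem.List.index? (closeParentesisBal L R S.toList 0) (-1 : Int) with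
  | some i => some (i : Int)
  | none => none

-- ===== PRECONDITION & SPEC =====
def Spec_closeParentesis (L : String) (S : String) (out : Option Int) : Prop := out = closeParentesis_alt L S
instance (L : String) (S : String) (out : Option Int) : Decidable (Spec_closeParentesis L S out) := by unfold Spec_closeParentesis; infer_instance

-- ===== CLAIM (what is proved, stated in full; the proofs are below) =====
def Claim_equal_closeParentesis : Prop := ∀ (L : String) (S : String), Dom_closeParentesis L S → Spec_closeParentesis L S (closeParentesis L S)

-- ===== LEMMAS AND PROOFS =====

theorem R_eq (L : String) : closeParentesisR L =
    (if L = "[" then "]" else if L = "(" then ")" else "}") := by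
  by_cases h1 : L = "{"
  · subst h1; decide
  · rw [closeParentesisR, if_neg h1]

-- degenerate case L = R (only L = "}"): A never returns an index
theorem loopA_none (L : String) (S : List Char) :
    ∀ (index : Int) (stack : List Char), closeParentesisLoop L L S index stack = none := by
  induction S with
  | nil => intro index stack; rfl
  | cons ch rest ih =>
    intro index stack
    by_cases hL : String.mk [ch] = L
    · rw [closeParentesisLoop, if_pos hL]; exact ih _ _
    · rw [closeParentesisLoop, if_neg hL, if_neg hL]; exact ih _ _

-- degenerate case L = R: all deltas are 0, so the balance list is constant
theorem bal_replicate (L : String) (S : List Char) (bal : Int) :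
    closeParentesisBal L L S bal = List.replicate S.length bal := by
  induction S generalizing bal with
  | nil => rfl
  | cons c rest ih =>
    have hb : bal + ((if String.mk [c] = L then (1:Int) else 0) - (if String.mk [c] = L then 1 else 0)) = bal := by
      split_ifs <;> ring
    simp only [closeParentesisBal, hb, ih, List.length_cons, List.replicate_succ]

-- main case L ≠ R: A's scan equals the first -1 in the balance list, started at the stack's size
theorem loopA_eq_index (L R : String) (hLR : L ≠ R) (S : List Char) :
    ∀ (index : Int) (stack : List Char), (∀ c ∈ stack, String.mk [c] = L) →
    closeParentesisLoop L R S index stack =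
      (PySem.List.index? (closeParentesisBal L R S (stack.length : Int)) (-1 : Int)).map
        (fun i : Nat => index + (i : Int)) := by
  induction S with
  | nil => intro index stack _; rfl
  | cons ch rest ih =>
    intro index stack hstack
    by_cases hL : String.mk [ch] = L
    · have hR : ¬ String.mk [ch] = R := fun h => hLR (hL ▸ h)
      rw [closeParentesisLoop, if_pos hL]
      simp only [closeParentesisBal, if_pos hL, if_neg hR]
      rw [PySem.List.index?_cons_of_ne _ (by omega : (stack.length : Int) + (1 - 0) ≠ -1)]
      rw [ih (index + 1) (stack ++ [ch]) (by
        intro c hc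
        rcases List.mem_append.1 hc with h | h
        · exact hstack c h
        · simp at h; subst h; exact hL)]
      rw [Option.map_map]
      have harg : ((stack ++ [ch]).length : Int) = (stack.length : Int) + (1 - 0) := by
        simp
      rw [harg]
      congr 1
      funext i; simp; omega
    · by_cases hR : String.mk [ch] = R
      · rw [closeParentesisLoop, if_neg hL, if_pos hR]
        simp only [closeParentesisBal, if_neg hL, if_pos hR]
        rcases eq_or_ne stack [] with hs | hs
        · subst hs
          rw [if_pos rfl]
          rw [show ((([] : List Char).length : Int) + (0 - 1)) = -1 by simp]
          rw [PySem.List.index?_cons_self]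
          simp
        · obtain ⟨ys, a, rfl⟩ := (List.eq_nil_or_concat stack).resolve_left hs
          rw [List.concat_eq_append] at hstack hs ⊢
          have htop : String.mk [(ys ++ [a]).getLastD ' '] = L := by
            have hmem : (ys ++ [a]).getLastD ' ' ∈ ys ++ [a] := by
              simp [List.getLastD_eq_getLast?]
            exact hstack _ hmem
          rw [if_neg hs]
          simp only [htop, if_pos]
          have harg : (((ys ++ [a]).length : Int) + (0 - 1)) = ((ys ++ [a]).dropLast.length : Int) := by
            simp
          rw [harg]
          rw [PySem.List.index?_cons_of_ne _ (by omega : ((ys ++ [a]).dropLast.length : Int) ≠ -1)]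
          rw [ih (index + 1) (ys ++ [a]).dropLast
            (fun c hc => hstack c (List.dropLast_subset _ hc))]
          rw [Option.map_map]
          congr 1
          funext i; simp; omega
      · rw [closeParentesisLoop, if_neg hL, if_neg hR]
        simp only [closeParentesisBal, if_neg hL, if_neg hR]
        rw [show (stack.length : Int) + (0 - 0) = (stack.length : Int) by ring]
        rw [PySem.List.index?_cons_of_ne _ (by omega : (stack.length : Int) ≠ -1)]
        rw [ih (index + 1) stack hstack, Option.map_map]
        congr 1
        funext i; simp; omega

-- ===== VERDICT (by name: the statement is the Claim_ definition above) =====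
theorem closeParentesis_spec : Claim_equal_closeParentesis := by
  intro L S _
  unfold Spec_closeParentesis closeParentesis
  have halt : closeParentesis_alt L S =
      (match PySem.List.index? (closeParentesisBal L (closeParentesisR L) S.toList 0) (-1 : Int) with
       | some i => some (i : Int) | none => none) := by
    rw [R_eq]; rfl
  rw [halt]
  by_cases h : L = closeParentesisR L
  · rw [← h, loopA_none, bal_replicate]
    have hm : (-1 : Int) ∉ List.replicate S.toList.length (0 : Int) := by
      intro hm; have := List.eq_of_mem_replicate hm; omega
    rw [(PySem.List.index?_eq_none_iff _ _).2 hm]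
  · rw [loopA_eq_index L (closeParentesisR L) h S.toList 0 [] (by simp)]
    simp only [List.length_nil, Nat.cast_zero]
    cases hx : PySem.List.index? (closeParentesisBal L (closeParentesisR L) S.toList 0) (-1 : Int) <;> simp
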